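-- pv_equiv track=rewrite | github.com/YuneeeM/Python_Algorithm | 프로그래머스/lv0/1002/1004-12.py | solution
-- ===== SOURCE A (Python) =====
-- def solution(spell, dic):
--     answer = 0
--     n = len(spell)
--     arr = []
--     for x in dic:
--         answer = 0
--         for i in spell:
--             if i in x:
--                 answer += 1
--         arr.append(int(answer))
--
--     for x in arr:
--         if x == n:
--             return 1
--     else:
--         return 2
-- ===== SOURCE B (Python) =====
-- def solution(spell, dic):
--     # Invert the loops: keep a shrinking candidate list of dictionary words,
--     # filtering by each spell element in turn (intersection of match sets).
--     candidates = dic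
--     for s in spell:
--         candidates = [w for w in candidates if s in w]
--     return 1 if candidates else 2
-- ===== Notes on version B (the rewrite author's own statement) =====
-- stated objective: alternative
-- what changed: Inverts the loop nesting: instead of counting matched spells per word and then scanning a counts list, B iterates over spell on the outside and successively filters a candidate list of dictionary words (intersecting the per-spell match sets), returning 1 iff any candidate survives.
import Mathlib
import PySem

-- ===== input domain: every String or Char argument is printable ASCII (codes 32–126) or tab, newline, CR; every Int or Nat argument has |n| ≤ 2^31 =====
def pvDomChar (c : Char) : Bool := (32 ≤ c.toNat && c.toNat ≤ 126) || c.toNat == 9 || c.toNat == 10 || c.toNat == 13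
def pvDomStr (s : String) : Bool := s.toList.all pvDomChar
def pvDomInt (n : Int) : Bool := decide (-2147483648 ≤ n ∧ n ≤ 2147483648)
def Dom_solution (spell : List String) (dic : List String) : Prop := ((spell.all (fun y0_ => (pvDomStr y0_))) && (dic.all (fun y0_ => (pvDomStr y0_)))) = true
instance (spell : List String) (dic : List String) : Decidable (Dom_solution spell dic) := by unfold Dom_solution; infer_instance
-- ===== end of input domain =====

-- B inverts the loop nesting: it successively filters a candidate list of dictionary
-- words by each spell element (intersection of match sets) instead of counting
-- matches per word and scanning a counts list. Alternative decomposition, same cost.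

-- ===== PORT A =====
-- 'for i in spell: if i in x: answer += 1'
def solCount (spell : List String) (x : String) : Int :=
  spell.foldl (fun answer i => if PySem.Str.isIn i x then answer + 1 else answer) 0

-- 'for x in arr: if x == n: return 1  else: return 2'  (for-else: 2 when the loop finishes)
def solScan (arr : List Int) (n : Int) : Int :=
  match arr with
  | [] => 2
  | x :: rest => if x = n then 1 else solScan rest n

def solution (spell : List String) (dic : List String) : Int :=
  let n : Int := spell.length
  let arr := dic.foldl (fun arr x => arr ++ [solCount spell x]) []
  solScan arr n

-- ===== PORT B =====
-- 'candidates = [w for w in candidates if s in w]' folded over spell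
def solution_alt (spell : List String) (dic : List String) : Int :=
  let candidates := spell.foldl (fun cs s => cs.filter (fun w => PySem.Str.isIn s w)) dic
  if candidates.isEmpty then 2 else 1

-- ===== PRECONDITION & SPEC =====
def Spec_solution (spell : List String) (dic : List String) (out : Int) : Prop := out = solution_alt spell dic
instance (spell : List String) (dic : List String) (out : Int) : Decidable (Spec_solution spell dic out) := by unfold Spec_solution; infer_instance

-- ===== CLAIM (what is proved, stated in full; the proofs are below) =====
def Claim_equal_solution : Prop := ∀ (spell : List String) (dic : List String), Dom_solution spell dic → Spec_solution spell dic (solution spell dic)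

-- ===== LEMMAS AND PROOFS =====

-- the counting loop is a countP (generalized over the accumulator)
theorem solCount_foldl (spell : List String) (x : String) (a : Int) :
    spell.foldl (fun answer i => if PySem.Str.isIn i x then answer + 1 else answer) a
      = a + (spell.countP (fun i => PySem.Str.isIn i x) : Int) := by
  induction spell generalizing a with
  | nil => simp
  | cons b l ih =>
    simp only [List.foldl_cons, List.countP_cons, ih]
    split_ifs <;> push_cast <;> ring

-- count == len(spell) iff every spell string is a substring
theorem solCount_eq_len_iff (spell : List String) (x : String) :
    (solCount spell x = (spell.length : Int)) ↔ spell.all (fun s => PySem.Str.isIn s x) = true := by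
  unfold solCount
  rw [solCount_foldl, zero_add]
  rw [show ((spell.countP (fun i => PySem.Str.isIn i x) : Int) = (spell.length : Int))
        ↔ spell.countP (fun i => PySem.Str.isIn i x) = spell.length from Int.natCast_inj]
  rw [List.countP_eq_length]
  simp [List.all_eq_true]

-- the append-foldl builds the map
theorem arr_eq_map (spell : List String) (dic : List String) :
    dic.foldl (fun arr x => arr ++ [solCount spell x]) [] = dic.map (solCount spell) := by
  rw [PySem.List.foldl_append_singleton_eq_map]; rfl

-- A's scan over the mapped counts list returns 1 iff some word contains every spell string
theorem solScan_map (spell : List String) (dic : List String) :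
    solScan (dic.map (solCount spell)) (spell.length : Int)
      = if dic.any (fun word => spell.all (fun s => PySem.Str.isIn s word)) then 1 else 2 := by
  induction dic with
  | nil => simp [solScan]
  | cons w rest ih =>
    simp only [List.map_cons, solScan, List.any_cons, ih]
    by_cases h : solCount spell w = (spell.length : Int)
    · simp only [if_pos h, (solCount_eq_len_iff spell w).mp h, Bool.true_or]
      rfl
    · have h2 : spell.all (fun s => PySem.Str.isIn s w) = false := by
        rcases Bool.eq_false_or_eq_true (spell.all (fun s => PySem.Str.isIn s w)) with h' | h'
        · exact absurd ((solCount_eq_len_iff spell w).mpr h') h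
        · exact h'
      simp only [if_neg h, h2, Bool.false_or]

-- B's successive filtering equals one filter by the conjunction of all spell predicates
theorem foldl_filter_eq (spell : List String) (dic : List String) :
    spell.foldl (fun cs s => cs.filter (fun w => PySem.Str.isIn s w)) dic
      = dic.filter (fun w => spell.all (fun s => PySem.Str.isIn s w)) := by
  induction spell generalizing dic with
  | nil => simp
  | cons s rest ih =>
    simp only [List.foldl_cons, ih, List.filter_filter, List.all_cons]
    congr 1
    funext w
    exact Bool.and_comm _ _

-- ===== VERDICT (by name: the statement is the Claim_ definition above) =====
theorem solution_spec : Claim_equal_solution := by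
  intro spell dic _
  unfold Spec_solution solution solution_alt
  rw [arr_eq_map, solScan_map, foldl_filter_eq]
  cases hb : dic.any (fun word => spell.all (fun s => PySem.Str.isIn s word)) with
  | true =>
    have hf : (dic.filter (fun w => spell.all (fun s => PySem.Str.isIn s w))).isEmpty = false := by
      simp only [List.isEmpty_eq_false_iff_exists_mem]
      obtain ⟨w, hw, hp⟩ := List.any_eq_true.mp hb
      exact ⟨w, List.mem_filter.mpr ⟨hw, hp⟩⟩
    simp only [hb, hf]
    rfl
  | false =>
    have hf : (dic.filter (fun w => spell.all (fun s => PySem.Str.isIn s w))).isEmpty = true := by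
      rw [List.isEmpty_iff, List.filter_eq_nil_iff]
      intro w hw
      exact List.any_eq_false.mp hb w hw
    simp only [hb, hf]
    rfl
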